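-- pv_equiv track=rewrite | github.com/Wentaa/novel-audit | src/app/agents/arbitration_agent.py | _are_decisions_conflicting
-- ===== SOURCE A (Python) =====
-- def _are_decisions_conflicting(decision1: str, decision2: str) -> bool:
--     """Check if two decisions are conflicting"""
--     # Define conflicting decision pairs
--     conflicts = [
--         ("compliant", "non_compliant"),
--         ("positive", "harmful"),
--         ("excellent", "unacceptable"),
--         ("low", "critical"),
--         ("approved", "rejected")
--     ]
--
--     for conflict_pair in conflicts:
--         if (decision1 in conflict_pair and decision2 in conflict_pair and
--             decision1 != decision2):
--             return True
--
--     return False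
-- ===== SOURCE B (Python) =====
-- # Flat word table: conflicting partners occupy adjacent slots (even/odd).
-- _WORDS = ("compliant", "non_compliant",
--           "positive", "harmful",
--           "excellent", "unacceptable",
--           "low", "critical",
--           "approved", "rejected")
--
-- def _are_decisions_conflicting(decision1: str, decision2: str) -> bool:
--     """Check if two decisions are conflicting"""
--     try:
--         i = _WORDS.index(decision1)
--         j = _WORDS.index(decision2)
--     except ValueError:
--         return False
--     return i ^ 1 == j
-- ===== Notes on version B (the rewrite author's own statement) =====
-- stated objective: alternative
-- what changed: Dropped the pair structure entirely: B keeps one flat tuple of the 10 words with partners in adjacent slots, looks up both indices, and decides conflict by index arithmetic (i ^ 1 == j) instead of scanning pair tuples for membership.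
import Mathlib
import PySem

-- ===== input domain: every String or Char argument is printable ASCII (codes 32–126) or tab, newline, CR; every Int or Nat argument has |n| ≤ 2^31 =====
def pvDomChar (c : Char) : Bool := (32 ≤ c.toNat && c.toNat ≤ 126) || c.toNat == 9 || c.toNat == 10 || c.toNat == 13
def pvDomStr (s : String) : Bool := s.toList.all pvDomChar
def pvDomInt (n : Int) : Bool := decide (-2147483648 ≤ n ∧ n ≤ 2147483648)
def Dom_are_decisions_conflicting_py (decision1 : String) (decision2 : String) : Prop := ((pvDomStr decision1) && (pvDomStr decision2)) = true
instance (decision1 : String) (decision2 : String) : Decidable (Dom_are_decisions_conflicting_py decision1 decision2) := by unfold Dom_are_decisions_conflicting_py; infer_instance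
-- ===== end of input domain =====

-- B drops A's pair tuples: it keeps one flat word table with partners in adjacent
-- slots and decides conflict by index arithmetic (i ^ 1 == j) (objective: alternative).

-- ===== PORT A =====
-- the literal `conflicts` list inside A
def pvConflicts : List (String × String) :=
  [("compliant", "non_compliant"),
   ("positive", "harmful"),
   ("excellent", "unacceptable"),
   ("low", "critical"),
   ("approved", "rejected")]

-- A's for-loop with early return; 'decision1 in conflict_pair' is membership in the 2-tuple
def pvLoopA (decision1 decision2 : String) : List (String × String) → Bool
  | [] => false
  | p :: rest =>
    if ((decision1 == p.1 || decision1 == p.2) &&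
        (decision2 == p.1 || decision2 == p.2) &&
        !(decision1 == decision2)) then true
    else pvLoopA decision1 decision2 rest

def are_decisions_conflicting_py (decision1 : String) (decision2 : String) : Bool :=
  pvLoopA decision1 decision2 pvConflicts

-- ===== PORT B =====
-- the module-level _WORDS tuple of Source B: partners occupy adjacent (even/odd) slots
def pvWords : List String :=
  ["compliant", "non_compliant",
   "positive", "harmful",
   "excellent", "unacceptable",
   "low", "critical",
   "approved", "rejected"]

-- _WORDS.index raising ValueError (= index? none) makes the except branch return False;
-- otherwise return i ^ 1 == j
def are_decisions_conflicting_py_alt (decision1 : String) (decision2 : String) : Bool :=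
  match PySem.List.index? pvWords decision1, PySem.List.index? pvWords decision2 with
  | some i, some j => (i ^^^ 1) == j
  | _, _ => false

-- ===== PRECONDITION & SPEC =====
def Spec_are_decisions_conflicting_py (decision1 : String) (decision2 : String) (out : Bool) : Prop := out = are_decisions_conflicting_py_alt decision1 decision2
instance (decision1 : String) (decision2 : String) (out : Bool) : Decidable (Spec_are_decisions_conflicting_py decision1 decision2 out) := by unfold Spec_are_decisions_conflicting_py; infer_instance

-- ===== CLAIM (what is proved, stated in full; the proofs are below) =====
def Claim_equal_are_decisions_conflicting_py : Prop := ∀ (decision1 : String) (decision2 : String), Dom_are_decisions_conflicting_py decision1 decision2 → Spec_are_decisions_conflicting_py decision1 decision2 (are_decisions_conflicting_py decision1 decision2)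

-- ===== LEMMAS AND PROOFS =====

theorem pvANoD1 (d1 d2 : String) (h : d1 ∉ pvWords) :
    pvLoopA d1 d2 pvConflicts = false := by
  simp only [pvWords, List.mem_cons, List.not_mem_nil, or_false, not_or] at h
  obtain ⟨h1, h2, h3, h4, h5, h6, h7, h8, h9, h10⟩ := h
  simp [pvLoopA, pvConflicts, h1, h2, h3, h4, h5, h6, h7, h8, h9, h10]

theorem pvANoD2 (d1 d2 : String) (h : d2 ∉ pvWords) :
    pvLoopA d1 d2 pvConflicts = false := by
  simp only [pvWords, List.mem_cons, List.not_mem_nil, or_false, not_or] at h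
  obtain ⟨h1, h2, h3, h4, h5, h6, h7, h8, h9, h10⟩ := h
  simp [pvLoopA, pvConflicts, h1, h2, h3, h4, h5, h6, h7, h8, h9, h10]

theorem pvAltNoneL (d1 d2 : String) (h : d1 ∉ pvWords) :
    are_decisions_conflicting_py_alt d1 d2 = false := by
  unfold are_decisions_conflicting_py_alt
  rw [show PySem.List.index? pvWords d1 = none from
    (PySem.List.index?_eq_none_iff _ _).mpr h]

theorem pvAltNoneR (d1 d2 : String) (h : d2 ∉ pvWords) :
    are_decisions_conflicting_py_alt d1 d2 = false := by
  unfold are_decisions_conflicting_py_alt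
  rw [show PySem.List.index? pvWords d2 = none from
    (PySem.List.index?_eq_none_iff _ _).mpr h]
  cases PySem.List.index? pvWords d1 <;> rfl

-- ===== VERDICT (by name: the statement is the Claim_ definition above) =====
theorem are_decisions_conflicting_py_spec : Claim_equal_are_decisions_conflicting_py := by
  intro d1 d2 _
  unfold Spec_are_decisions_conflicting_py are_decisions_conflicting_py
  by_cases hm1 : d1 ∈ pvWords
  · by_cases hm2 : d2 ∈ pvWords
    · simp only [pvWords, List.mem_cons, List.not_mem_nil, or_false] at hm1 hm2
      rcases hm1 with h|h|h|h|h|h|h|h|h|h <;>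
        rcases hm2 with g|g|g|g|g|g|g|g|g|g <;> subst h <;> subst g <;> decide
    · rw [pvANoD2 d1 d2 hm2, pvAltNoneR d1 d2 hm2]
  · rw [pvANoD1 d1 d2 hm1, pvAltNoneL d1 d2 hm1]
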